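-- pv_equiv track=rewrite | github.com/imgolye/openclaw-team | backend/presentation/http/runtime_parts/task.py | task_route
-- ===== SOURCE A (Python) =====
-- def task_route(task):
--     labels = []
--     for entry in task.get("flow_log", []):
--         if entry.get("from"):
--             labels.append(str(entry["from"]))
--         if entry.get("to"):
--             labels.append(str(entry["to"]))
--     deduped = []
--     for label in labels:
--         if not deduped or deduped[-1] != label:
--             deduped.append(label)
--     return deduped[-8:]
-- ===== SOURCE B (Python) =====
-- def task_route(task):
--     # Walk the flow log backwards, collapsing consecutive duplicates while
--     # building the result front-to-back, and stop as soon as 8 labels are known.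
--     res = []
--     for entry in reversed(task.get("flow_log", [])):
--         for value in (entry.get("to"), entry.get("from")):
--             if value:
--                 if len(res) == 8:
--                     return res
--                 label = str(value)
--                 if not res or res[0] != label:
--                     res.insert(0, label)
--     return res
-- ===== Notes on version B (the rewrite author's own statement) =====
-- stated objective: alternative
-- what changed: B scans the flow log backwards (to-label before from-label), collapses consecutive duplicates by prepending to the result, and returns early once 8 labels are collected, instead of A's build-all-labels / dedup-all / slice-last-8 three-pass approach.
import Mathlib
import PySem

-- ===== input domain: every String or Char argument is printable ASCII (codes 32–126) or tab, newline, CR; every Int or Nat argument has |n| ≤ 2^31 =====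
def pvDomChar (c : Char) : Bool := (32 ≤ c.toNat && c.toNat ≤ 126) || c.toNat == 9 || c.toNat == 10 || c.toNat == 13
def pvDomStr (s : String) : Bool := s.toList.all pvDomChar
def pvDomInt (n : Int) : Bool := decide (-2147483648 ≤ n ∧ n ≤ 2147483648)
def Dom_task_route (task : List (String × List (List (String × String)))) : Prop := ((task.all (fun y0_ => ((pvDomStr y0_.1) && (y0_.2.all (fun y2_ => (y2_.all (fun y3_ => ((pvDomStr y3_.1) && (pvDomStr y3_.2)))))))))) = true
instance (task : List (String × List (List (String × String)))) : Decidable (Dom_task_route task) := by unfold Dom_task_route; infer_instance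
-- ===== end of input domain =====

-- B walks the flow log backwards collapsing consecutive duplicates, stopping once 8 labels are
-- collected, instead of A's build-all / dedup-all / slice-last-8 passes (objective: alternative).


-- ===== PORT A =====
def task_route (task : List (String × List (List (String × String)))) : List String :=
  let labels := (PySem.Dict.getD (PySem.Dict.mk task) "flow_log" []).foldl
    (fun labels entry =>
      let labels :=
        match PySem.Dict.get? (PySem.Dict.mk entry) "from" with
        | some s => if s ≠ "" then labels ++ [s] else labels
        | none => labels
      match PySem.Dict.get? (PySem.Dict.mk entry) "to" with
      | some s => if s ≠ "" then labels ++ [s] else labels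
      | none => labels) []
  let deduped := labels.foldl
    (fun d l => if d = [] ∨ PySem.List.pyGet? d (-1) ≠ some l then d ++ [l] else d) []
  PySem.List.slice deduped (some (-8)) none

-- ===== PORT B =====
-- one inner-loop body of Source B: returns (early-return?, res after this candidate value)
def pvBHandle (res : List String) (v : Option String) : Bool × List String :=
  match v with
  | some s =>
    if s ≠ "" then
      if res.length = 8 then (true, res)
      else if res = [] ∨ res.head? ≠ some s then (false, s :: res) else (false, res)
    else (false, res)
  | none => (false, res)

def pvBGo : List String → List (List (String × String)) → List String
  | res, [] => res
  | res, e :: es =>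
    let r1 := pvBHandle res (PySem.Dict.get? (PySem.Dict.mk e) "to")
    if r1.1 then r1.2
    else
      let r2 := pvBHandle r1.2 (PySem.Dict.get? (PySem.Dict.mk e) "from")
      if r2.1 then r2.2 else pvBGo r2.2 es

def task_route_alt (task : List (String × List (List (String × String)))) : List String :=
  pvBGo [] (PySem.Dict.getD (PySem.Dict.mk task) "flow_log" []).reverse

-- ===== PRECONDITION & SPEC =====
def Spec_task_route (task : List (String × List (List (String × String)))) (out : List String) : Prop := out = task_route_alt task
instance (task : List (String × List (List (String × String)))) (out : List String) : Decidable (Spec_task_route task out) := by unfold Spec_task_route; infer_instance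

-- ===== CLAIM (what is proved, stated in full; the proofs are below) =====
def Claim_equal_task_route : Prop := ∀ (task : List (String × List (List (String × String)))), Dom_task_route task → Spec_task_route task (task_route task)

-- ===== LEMMAS AND PROOFS =====

-- the (0 or 1) label an entry's value contributes
def pvLabelsOf (v : Option String) : List String :=
  match v with
  | some s => if s ≠ "" then [s] else []
  | none => []

def pvF (e : List (String × String)) : List String :=
  pvLabelsOf (PySem.Dict.get? (PySem.Dict.mk e) "from") ++ pvLabelsOf (PySem.Dict.get? (PySem.Dict.mk e) "to")

def pvG (e : List (String × String)) : List String :=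
  pvLabelsOf (PySem.Dict.get? (PySem.Dict.mk e) "to") ++ pvLabelsOf (PySem.Dict.get? (PySem.Dict.mk e) "from")

-- run-length collapse, recursively
def pvDedFrom : String → List String → List String
  | _, [] => []
  | h, x :: xs => if x = h then pvDedFrom h xs else x :: pvDedFrom x xs

def pvDed : List String → List String
  | [] => []
  | x :: xs => x :: pvDedFrom x xs

-- the backward cons-step
def pvStep (res : List String) (y : String) : List String :=
  if res = [] ∨ res.head? ≠ some y then y :: res else res

-- freeze-at-8 fold over the backward label stream
def pvFF : List String → List String → List String
  | res, [] => res
  | res, y :: ys => if res.length = 8 then res else pvFF (pvStep res y) ys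

def pvLast8 (l : List String) : List String := l.drop (l.length - 8)

theorem pvA_step_eq (acc : List String) (e : List (String × String)) :
    (let acc' :=
        match PySem.Dict.get? (PySem.Dict.mk e) "from" with
        | some s => if s ≠ "" then acc ++ [s] else acc
        | none => acc
      match PySem.Dict.get? (PySem.Dict.mk e) "to" with
      | some s => if s ≠ "" then acc' ++ [s] else acc'
      | none => acc') = acc ++ pvF e := by
  simp only [pvF, pvLabelsOf]
  cases PySem.Dict.get? (PySem.Dict.mk e) "from" <;>
    cases PySem.Dict.get? (PySem.Dict.mk e) "to" <;> simp <;> split_ifs <;> simp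

theorem pvA_labels (l : List (List (String × String))) :
    l.foldl (fun labels entry =>
      let labels :=
        match PySem.Dict.get? (PySem.Dict.mk entry) "from" with
        | some s => if s ≠ "" then labels ++ [s] else labels
        | none => labels
      match PySem.Dict.get? (PySem.Dict.mk entry) "to" with
      | some s => if s ≠ "" then labels ++ [s] else labels
      | none => labels) [] = l.flatMap pvF := by
  have h : (fun (labels : List String) entry =>
      let labels :=
        match PySem.Dict.get? (PySem.Dict.mk entry) "from" with
        | some s => if s ≠ "" then labels ++ [s] else labels
        | none => labels
      match PySem.Dict.get? (PySem.Dict.mk entry) "to" with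
      | some s => if s ≠ "" then labels ++ [s] else labels
      | none => labels) = fun acc e => acc ++ pvF e := by
    funext acc e; exact pvA_step_eq acc e
  rw [h, PySem.List.foldl_append_eq_flatMap]
  simp

theorem pvA_dedup_inv (L : List String) : ∀ (d : List String) (h : String),
    d.getLast? = some h →
    L.foldl (fun d l => if d = [] ∨ PySem.List.pyGet? d (-1) ≠ some l then d ++ [l] else d) d
      = d ++ pvDedFrom h L := by
  induction L with
  | nil => intro d h _; simp [pvDedFrom]
  | cons x xs ih =>
    intro d h hlast
    have hne : d ≠ [] := by rintro rfl; simp at hlast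
    have hget : PySem.List.pyGet? d (-1) = some h := by
      rw [PySem.List.pyGet?_neg_one]; exact hlast
    rw [List.foldl_cons]
    by_cases hx : x = h
    · subst hx
      rw [if_neg (by rintro (h1 | h2); exact hne h1; exact h2 hget)]
      rw [ih d x hlast]
      simp [pvDedFrom]
    · rw [if_pos (Or.inr (by rw [hget]; simp; exact fun e => hx e.symm))]
      rw [ih (d ++ [x]) x (by simp)]
      simp [pvDedFrom, hx]

theorem pvA_dedup (L : List String) :
    L.foldl (fun d l => if d = [] ∨ PySem.List.pyGet? d (-1) ≠ some l then d ++ [l] else d) []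
      = pvDed L := by
  cases L with
  | nil => simp [pvDed]
  | cons x xs =>
    rw [List.foldl_cons]
    have h1 : (if ([] : List String) = [] ∨ PySem.List.pyGet? ([] : List String) (-1) ≠ some x
        then ([] : List String) ++ [x] else []) = [x] := by simp
    rw [h1]
    simpa [pvDed] using pvA_dedup_inv xs [x] x (by simp)

theorem pvR1 (L : List String) : L.reverse.foldl pvStep [] = pvDed L := by
  induction L with
  | nil => simp [pvDed]
  | cons x xs ih =>
    rw [List.reverse_cons, List.foldl_append, ih]
    cases xs with
    | nil => simp [pvDed, pvStep, pvDedFrom]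
    | cons y t =>
      by_cases hxy : y = x
      · subst hxy
        simp [pvDed, pvStep, pvDedFrom]
      · simp [pvDed, pvStep, pvDedFrom, hxy]

theorem pvSuffix (ys : List String) : ∀ res, ∃ ws, ys.foldl pvStep res = ws ++ res := by
  induction ys with
  | nil => intro res; exact ⟨[], rfl⟩
  | cons y ys ih =>
    intro res
    simp only [List.foldl_cons, pvStep]
    split_ifs with h
    · obtain ⟨ws, hw⟩ := ih (y :: res)
      exact ⟨ws ++ [y], by simp [hw]⟩
    · exact ih res

theorem pvStep_len (res : List String) (y : String) :
    (pvStep res y).length ≤ res.length + 1 := by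
  simp only [pvStep]; split_ifs <;> simp

theorem pvFF_eq_last8 (ys : List String) : ∀ res, res.length ≤ 8 →
    pvFF res ys = pvLast8 (ys.foldl pvStep res) := by
  induction ys with
  | nil => intro res h; simp [pvFF, pvLast8, Nat.sub_eq_zero_of_le h]
  | cons y ys ih =>
    intro res h
    simp only [pvFF]
    split_ifs with h8
    · obtain ⟨ws, hw⟩ := pvSuffix (y :: ys) res
      rw [hw]
      simp [pvLast8, h8, List.drop_left']
    · have : res.length < 8 := lt_of_le_of_ne h h8
      rw [ih (pvStep res y) (le_trans (pvStep_len res y) (by omega))]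
      rfl

theorem pvC1 (res : List String) (v : Option String) (rest : List String) :
    pvFF res (pvLabelsOf v ++ rest)
      = if (pvBHandle res v).1 then (pvBHandle res v).2 else pvFF (pvBHandle res v).2 rest := by
  cases v with
  | none => simp [pvLabelsOf, pvBHandle]
  | some s =>
    by_cases hs : s = ""
    · simp [pvLabelsOf, pvBHandle, hs]
    · by_cases h8 : res.length = 8
      · simp [pvLabelsOf, pvBHandle, hs, h8, pvFF]
      · by_cases hc : res = [] ∨ res.head? ≠ some s
        · simp [pvLabelsOf, pvBHandle, hs, h8, hc, pvFF, pvStep]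
        · simp [pvLabelsOf, pvBHandle, hs, h8, hc, pvFF, pvStep]

theorem pvB2 (es : List (List (String × String))) : ∀ res,
    pvBGo res es = pvFF res (es.flatMap pvG) := by
  induction es with
  | nil => intro res; simp [pvBGo, pvFF]
  | cons e es ih =>
    intro res
    rw [List.flatMap_cons]
    simp only [pvG, List.append_assoc]
    rw [pvC1 res _ _, pvC1 _ _ _]
    simp only [pvBGo]
    split_ifs with h1 h2 <;> simp [ih]

theorem pvG_eq_reverse_pvF (e : List (String × String)) : pvG e = (pvF e).reverse := by
  simp only [pvF, pvG, pvLabelsOf, List.reverse_append]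
  cases PySem.Dict.get? (PySem.Dict.mk e) "from" <;>
    cases PySem.Dict.get? (PySem.Dict.mk e) "to" <;> simp <;> split_ifs <;> simp

theorem pvRevFlat (l : List (List (String × String))) :
    l.reverse.flatMap pvG = (l.flatMap pvF).reverse := by
  rw [List.reverse_flatMap]
  exact List.flatMap_congr (fun e _ => pvG_eq_reverse_pvF e) |>.symm ▸ rfl

-- ===== VERDICT (by name: the statement is the Claim_ definition above) =====
theorem task_route_spec : Claim_equal_task_route := by
  intro task _
  show task_route task = task_route_alt task
  unfold task_route task_route_alt
  simp only [pvA_labels, pvA_dedup, pvB2, pvRevFlat]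
  rw [pvFF_eq_last8 _ [] (by simp), pvR1, PySem.List.slice_from_neg_ofNat _ 8 (by omega)]
  rfl
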